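-- pv_equiv track=rewrite | github.com/r1005410078/eng-book-flutter | tools/course_pipeline/course_pipeline_ops.py | _chunk_indices_by_budget
-- ===== SOURCE A (Python) =====
-- def _chunk_indices_by_budget(items: list[tuple[int, str]], max_items: int, max_chars: int) -> list[list[tuple[int, str]]]:
--     chunks: list[list[tuple[int, str]]] = []
--     current: list[tuple[int, str]] = []
--     current_chars = 0
--     for item in items:
--         item_chars = len(item[1])
--         if current and (len(current) >= max_items or current_chars + item_chars > max_chars):
--             chunks.append(current)
--             current = []
--             current_chars = 0
--         current.append(item)
--         current_chars += item_chars
--     if current: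
--         chunks.append(current)
--     return chunks
-- ===== SOURCE B (Python) =====
-- def _chunk_indices_by_budget(items: list[tuple[int, str]], max_items: int, max_chars: int) -> list[list[tuple[int, str]]]:
--     n = len(items)
--     prefix = [0] * (n + 1)
--     for k in range(n):
--         prefix[k + 1] = prefix[k] + len(items[k][1])
--     chunks = []
--     i = 0
--     while i < n:
--         # binary search: first j in [i+1, n+1] with prefix[j] - prefix[i] > max_chars (n+1 if none)
--         lo, hi = i + 1, n + 1
--         while lo < hi:
--             mid = (lo + hi) // 2
--             if prefix[mid] - prefix[i] <= max_chars:
--                 lo = mid + 1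
--             else:
--                 hi = mid
--         e = max(i + 1, min(i + max_items, lo - 1))
--         chunks.append(items[i:e])
--         i = e
--     return chunks
-- ===== Notes on version B (the rewrite author's own statement) =====
-- stated objective: alternative
-- what changed: Replaces A's single-pass flush-before-append accumulator with a two-stage algorithm: one pass builds a prefix-sum array of character lengths, then each chunk's end index is found by binary search over the monotone prefix sums (clamped by the item-count budget and the unconditional first item) and the chunk is emitted as a slice.
import Mathlib
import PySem

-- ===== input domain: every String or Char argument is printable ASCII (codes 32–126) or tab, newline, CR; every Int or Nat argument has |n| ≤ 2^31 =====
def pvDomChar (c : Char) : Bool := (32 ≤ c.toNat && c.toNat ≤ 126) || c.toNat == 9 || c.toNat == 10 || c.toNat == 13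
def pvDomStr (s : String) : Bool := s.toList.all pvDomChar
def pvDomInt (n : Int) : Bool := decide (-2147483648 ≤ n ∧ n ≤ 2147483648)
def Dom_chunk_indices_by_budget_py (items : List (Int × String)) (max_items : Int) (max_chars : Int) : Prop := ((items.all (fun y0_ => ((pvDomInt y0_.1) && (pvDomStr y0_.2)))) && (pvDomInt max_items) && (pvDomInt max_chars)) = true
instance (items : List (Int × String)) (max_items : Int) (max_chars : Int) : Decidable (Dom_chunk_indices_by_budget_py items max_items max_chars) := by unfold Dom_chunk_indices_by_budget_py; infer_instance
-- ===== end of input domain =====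

-- B replaces A's one-pass flush-before-append accumulator by a two-stage algorithm: a prefix-sum
-- array of character lengths plus a binary search for each chunk's end (objective: alternative).

-- ===== PORT A =====
-- pvStepA is the body of A's for-loop, named so the proofs can speak about it.
def pvStepA (max_items max_chars : Int)
    (s : List (List (Int × String)) × List (Int × String) × Int) (item : Int × String) :
    List (List (Int × String)) × List (Int × String) × Int :=
  let item_chars := PySem.Str.len item.2
  let chunks := s.1
  let current := s.2.1
  let current_chars := s.2.2
  let t :=
    if current ≠ [] ∧ ((current.length : Int) ≥ max_items ∨ current_chars + item_chars > max_chars) then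
      (chunks ++ [current], ([] : List (Int × String)), (0 : Int))
    else
      (chunks, current, current_chars)
  (t.1, t.2.1 ++ [item], t.2.2 + item_chars)

def chunk_indices_by_budget_py (items : List (Int × String)) (max_items : Int) (max_chars : Int) : List (List (Int × String)) :=
  let st := items.foldl (pvStepA max_items max_chars) ([], [], 0)
  if st.2.1 ≠ [] then st.1 ++ [st.2.1] else st.1

-- ===== PORT B =====
-- prefix[k]: the index is always in range where Source B reads it; getD 0 only totalizes the Lean term
def pvAt (p : List Int) (k : Int) : Int := (PySem.List.pyGet? p k).getD 0

-- transcription of Source B's prefix-filling for-loop: the prefix-sum array of char lengths, from acc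
def pvPrefix (acc : Int) : List (Int × String) → List Int
  | [] => [acc]
  | x :: xs => acc :: pvPrefix (acc + PySem.Str.len x.2) xs

-- mid = (lo + hi) // 2
def pvMid (lo hi : Int) : Int := PySem.Int.floordiv (lo + hi) 2

-- midpoint bounds, cited by pvBSearch's termination proof
lemma pvMid_bounds {lo hi : Int} (h : lo < hi) : lo ≤ pvMid lo hi ∧ pvMid lo hi < hi := by
  have h1 := PySem.Int.floordiv_mul_add_mod (lo + hi) 2
  have h2 := PySem.Int.mod_nonneg (lo + hi) (b := 2) (by norm_num)
  have h3 := PySem.Int.mod_lt (lo + hi) (b := 2) (by norm_num)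
  unfold pvMid
  omega

-- Source B's inner while-loop: binary search for the first j in [lo, hi) with prefix[j] - pi > mc (hi if none)
def pvBSearch (p : List Int) (q mc lo hi : Int) : Int :=
  if h : lo < hi then
    if pvAt p (pvMid lo hi) - q ≤ mc then pvBSearch p q mc (pvMid lo hi + 1) hi
    else pvBSearch p q mc lo (pvMid lo hi)
  else lo
termination_by (hi - lo).toNat
decreasing_by
  · have := pvMid_bounds h; omega
  · have := pvMid_bounds h; omega

-- e = max(i + 1, min(i + max_items, lo - 1))
def pvEnd (p : List Int) (mi mc n i : Int) : Int :=
  max (i + 1) (min (i + mi) (pvBSearch p (pvAt p i) mc (i + 1) (n + 1) - 1))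

-- cited by pvOuter's termination proof
lemma pvEnd_ge (p : List Int) (mi mc n i : Int) : i + 1 ≤ pvEnd p mi mc n i := le_max_left _ _

-- Source B's outer while-loop over the chunk start index i
def pvOuter (items : List (Int × String)) (p : List Int) (mi mc n i : Int) :
    List (List (Int × String)) :=
  if _h : i < n then
    PySem.List.slice items (some i) (some (pvEnd p mi mc n i)) ::
      pvOuter items p mi mc n (pvEnd p mi mc n i)
  else []
termination_by (n - i).toNat
decreasing_by
  have := pvEnd_ge p mi mc n i; omega

def chunk_indices_by_budget_py_alt (items : List (Int × String)) (max_items : Int) (max_chars : Int) : List (List (Int × String)) :=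
  pvOuter items (pvPrefix 0 items) max_items max_chars (items.length : Int) 0

-- ===== PRECONDITION & SPEC =====
def Spec_chunk_indices_by_budget_py (items : List (Int × String)) (max_items : Int) (max_chars : Int) (out : List (List (Int × String))) : Prop := out = chunk_indices_by_budget_py_alt items max_items max_chars
instance (items : List (Int × String)) (max_items : Int) (max_chars : Int) (out : List (List (Int × String))) : Decidable (Spec_chunk_indices_by_budget_py items max_items max_chars out) := by unfold Spec_chunk_indices_by_budget_py; infer_instance

-- ===== CLAIM (what is proved, stated in full; the proofs are below) =====
def Claim_equal_chunk_indices_by_budget_py : Prop := ∀ (items : List (Int × String)) (max_items : Int) (max_chars : Int), Dom_chunk_indices_by_budget_py items max_items max_chars → Spec_chunk_indices_by_budget_py items max_items max_chars (chunk_indices_by_budget_py items max_items max_chars)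

-- ===== LEMMAS AND PROOFS =====

-- A's greedy pass, restated as a seed-then-extend recursion (proof-only middleman between the ports)
def pvAltInner (max_items max_chars : Int) :
    List (Int × String) → List (Int × String) → Int → List (Int × String) × List (Int × String)
  | [], chunk, _ => (chunk, [])
  | x :: xs, chunk, chars =>
    if (chunk.length : Int) < max_items ∧ chars + PySem.Str.len x.2 ≤ max_chars then
      pvAltInner max_items max_chars xs (chunk ++ [x]) (chars + PySem.Str.len x.2)
    else
      (chunk, x :: xs)

lemma pvAltInner_rest_le (mi mc : Int) : ∀ (xs chunk : List (Int × String)) (chars : Int),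
    (pvAltInner mi mc xs chunk chars).2.length ≤ xs.length := by
  intro xs
  induction xs with
  | nil => intro chunk chars; simp [pvAltInner]
  | cons x xs ih =>
    intro chunk chars
    simp only [pvAltInner]
    split
    · exact Nat.le_trans (ih _ _) (Nat.le_succ _)
    · simp

def pvNested (mi mc : Int) : List (Int × String) → List (List (Int × String))
  | [] => []
  | x :: xs =>
    let p := pvAltInner mi mc xs [x] (PySem.Str.len x.2)
    p.1 :: pvNested mi mc p.2
termination_by l => l.length
decreasing_by
  exact Nat.lt_succ_of_le (pvAltInner_rest_le _ _ _ _ _)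

-- what A's trailing `if current: chunks.append(current)` computes from the loop's final state
def pvFinish (s : List (List (Int × String)) × List (Int × String) × Int) : List (List (Int × String)) :=
  if s.2.1 ≠ [] then s.1 ++ [s.2.1] else s.1

-- Invariant of A's loop: run from any state with a nonempty current chunk, the finished
-- result is the accumulated chunks followed by the seed-then-extend decomposition.
lemma pvLoop_eq (mi mc : Int) : ∀ (items current : List (Int × String)) (chars : Int)
    (chunks : List (List (Int × String))), current ≠ [] →
    pvFinish (items.foldl (pvStepA mi mc) (chunks, current, chars)) =
      chunks ++ ((pvAltInner mi mc items current chars).1 ::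
        pvNested mi mc (pvAltInner mi mc items current chars).2) := by
  intro items
  induction items with
  | nil =>
    intro current chars chunks hne
    simp [pvFinish, pvAltInner, pvNested, hne]
  | cons x xs ih =>
    intro current chars chunks hne
    by_cases hc : (current.length : Int) < mi ∧ chars + PySem.Str.len x.2 ≤ mc
    · have hstep : pvStepA mi mc (chunks, current, chars) x
          = (chunks, current ++ [x], chars + PySem.Str.len x.2) := by
        have : ¬ (current ≠ [] ∧ ((current.length : Int) ≥ mi ∨ chars + PySem.Str.len x.2 > mc)) := by
          rintro ⟨-, h | h⟩ <;> omega
        simp only [pvStepA]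
        rw [if_neg this]
      rw [List.foldl_cons, hstep, ih _ _ _ (by simp)]
      have haI : pvAltInner mi mc (x :: xs) current chars
          = pvAltInner mi mc xs (current ++ [x]) (chars + PySem.Str.len x.2) := by
        simp only [pvAltInner]; exact if_pos hc
      rw [haI]
    · have hstep : pvStepA mi mc (chunks, current, chars) x
          = (chunks ++ [current], [x], 0 + PySem.Str.len x.2) := by
        have hcond : current ≠ [] ∧ ((current.length : Int) ≥ mi ∨ chars + PySem.Str.len x.2 > mc) := by
          refine ⟨hne, ?_⟩
          rcases not_and_or.1 hc with h | h
          · exact Or.inl (by omega)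
          · exact Or.inr (by omega)
        simp only [pvStepA]
        rw [if_pos hcond]
        rfl
      rw [List.foldl_cons, hstep, ih _ _ _ (by simp)]
      have haI : pvAltInner mi mc (x :: xs) current chars = (current, x :: xs) := by
        simp only [pvAltInner]; exact if_neg hc
      rw [haI]
      simp only [pvNested]
      simp

-- A equals the seed-then-extend recursion
lemma pvA_eq_nested (items : List (Int × String)) (mi mc : Int) :
    chunk_indices_by_budget_py items mi mc = pvNested mi mc items := by
  unfold chunk_indices_by_budget_py
  cases items with
  | nil => simp [pvNested]
  | cons x xs =>
    have hstep : pvStepA mi mc ([], [], 0) x = ([], [x], 0 + PySem.Str.len x.2) := by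
      simp [pvStepA]
    have := pvLoop_eq mi mc xs [x] (0 + PySem.Str.len x.2) [] (by simp)
    simp only [List.foldl_cons, hstep]
    show pvFinish (xs.foldl (pvStepA mi mc) ([], [x], 0 + PySem.Str.len x.2)) = _
    rw [this]
    simp only [pvNested]
    simp

-- ---- prefix-sum arithmetic ----
def pvLen2 (x : Int × String) : Int := PySem.Str.len x.2

def pvS (xs : List (Int × String)) (k : Nat) : Int := ((xs.take k).map pvLen2).sum

lemma pvLen2_nonneg (x : Int × String) : 0 ≤ pvLen2 x := by
  simp [pvLen2, PySem.Str.len_eq]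

lemma pvS_cons_succ (x : Int × String) (xs : List (Int × String)) (k : Nat) :
    pvS (x :: xs) (k + 1) = pvLen2 x + pvS xs k := by
  simp [pvS]

lemma pvS_add (xs : List (Int × String)) (i m : Nat) :
    pvS xs (i + m) = pvS xs i + pvS (xs.drop i) m := by
  simp [pvS, List.take_add]

lemma pvS_mono (xs : List (Int × String)) {j k : Nat} (h : j ≤ k) : pvS xs j ≤ pvS xs k := by
  have hk : k = j + (k - j) := by omega
  rw [hk, pvS_add]
  have : 0 ≤ pvS (xs.drop j) (k - j) := by
    apply List.sum_nonneg
    intro a ha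
    obtain ⟨b, _, rfl⟩ := List.mem_map.1 ha
    exact pvLen2_nonneg b
  omega

lemma pvAt_pvPrefix : ∀ (xs : List (Int × String)) (acc : Int) (k : Nat), k ≤ xs.length →
    pvAt (pvPrefix acc xs) (k : Int) = acc + pvS xs k := by
  intro xs
  induction xs with
  | nil =>
    intro acc k hk
    simp only [List.length_nil, Nat.le_zero] at hk
    subst hk
    simp [pvAt, pvPrefix, pvS, PySem.List.pyGet?, PySem.List.pyIdx?]
  | cons x xs ih =>
    intro acc k hk
    cases k with
    | zero => simp [pvAt, pvPrefix, pvS]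
    | succ m =>
      have hm : m ≤ xs.length := by simpa using hk
      have := ih (acc + PySem.Str.len x.2) m hm
      rw [pvS_cons_succ]
      simp only [pvAt, pvPrefix, PySem.List.pyGet?_natCast] at this ⊢

      simp only [List.getElem?_cons_succ]
      rw [this]
      simp [pvLen2]
      ring

-- ---- binary-search invariant ----
lemma pvBSearch_inv (p : List Int) (q mc : Int) : ∀ (N : Nat) (lo hi : Int),
    (hi - lo).toNat ≤ N → lo ≤ hi →
    lo ≤ pvBSearch p q mc lo hi ∧ pvBSearch p q mc lo hi ≤ hi ∧
    (pvBSearch p q mc lo hi = lo ∨ pvAt p (pvBSearch p q mc lo hi - 1) - q ≤ mc) ∧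
    (pvBSearch p q mc lo hi = hi ∨ ¬ (pvAt p (pvBSearch p q mc lo hi) - q ≤ mc)) := by
  intro N
  induction N with
  | zero =>
    intro lo hi h1 h2
    have he : lo = hi := by omega
    subst he
    rw [pvBSearch, dif_neg (lt_irrefl lo)]
    exact ⟨le_refl _, le_refl _, Or.inl rfl, Or.inl rfl⟩
  | succ N ih =>
    intro lo hi h1 h2
    by_cases hlt : lo < hi
    · have hm := pvMid_bounds hlt
      rw [pvBSearch, dif_pos hlt]
      by_cases hp : pvAt p (pvMid lo hi) - q ≤ mc
      · rw [if_pos hp]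
        obtain ⟨a, b, c, d⟩ := ih (pvMid lo hi + 1) hi (by omega) (by omega)
        refine ⟨by omega, b, ?_, d⟩
        rcases c with he | h'
        · right; rw [he]; simpa using hp
        · right; exact h'
      · rw [if_neg hp]
        obtain ⟨a, b, c, d⟩ := ih lo (pvMid lo hi) (by omega) (by omega)
        refine ⟨a, by omega, c, ?_⟩
        rcases d with he | h'
        · right; rw [he]; exact hp
        · right; exact h'
    · rw [pvBSearch, dif_neg hlt]
      have : lo = hi := by omega
      exact ⟨le_refl _, by omega, Or.inl rfl, Or.inl this⟩

-- ---- greedy-extension characterisation ----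
lemma pvAltInner_spec (mi mc : Int) : ∀ (xs chunk : List (Int × String)) (chars : Int),
    ∃ t : Nat, t ≤ xs.length ∧
      pvAltInner mi mc xs chunk chars = (chunk ++ xs.take t, xs.drop t) ∧
      (∀ k : Nat, k < t → ((chunk.length : Int) + k < mi ∧ chars + pvS xs (k + 1) ≤ mc)) ∧
      (t = xs.length ∨ ¬ ((chunk.length : Int) + t < mi ∧ chars + pvS xs (t + 1) ≤ mc)) := by
  intro xs
  induction xs with
  | nil =>
    intro chunk chars
    exact ⟨0, by simp, by simp [pvAltInner], by omega, Or.inl rfl⟩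
  | cons x xs ih =>
    intro chunk chars
    by_cases hc : (chunk.length : Int) < mi ∧ chars + PySem.Str.len x.2 ≤ mc
    · obtain ⟨t, ht, heq, hall, hend⟩ := ih (chunk ++ [x]) (chars + PySem.Str.len x.2)
      refine ⟨t + 1, by simpa using ht, ?_, ?_, ?_⟩
      · simp only [pvAltInner, if_pos hc, heq]
        simp [List.take_succ_cons]
      · intro k hk
        cases k with
        | zero =>
          constructor
          · simpa using hc.1
          · have : pvS (x :: xs) 1 = PySem.Str.len x.2 := by
              rw [pvS_cons_succ]; simp [pvS, pvLen2]
            rw [this]; exact hc.2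
        | succ m =>
          have := hall m (by omega)
          rw [pvS_cons_succ]
          simp only [List.length_append, List.length_singleton] at this
          constructor
          · omega
          · have h2 := this.2
            simp only [pvLen2]
            push_cast at h2 ⊢
            omega
      · rcases hend with he | hne
        · left; simp [he]
        · right
          rw [pvS_cons_succ]
          simp only [List.length_append, List.length_singleton] at hne
          intro hcon
          apply hne
          constructor
          · push_cast at hcon ⊢; omega
          · have := hcon.2; simp only [pvLen2] at this; omega
    · refine ⟨0, by simp, ?_, by omega, ?_⟩
      · simp only [pvAltInner]
        rw [if_neg hc]
        simp
      · right
        intro hcon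
        apply hc
        have : pvS (x :: xs) 1 = PySem.Str.len x.2 := by
          rw [pvS_cons_succ]; simp [pvS, pvLen2]
        rw [this] at hcon
        simpa using hcon


-- ---- main equivalence: B's index loop equals the seed-then-extend recursion ----
lemma pvOuter_eq_nested (mi mc : Int) (items : List (Int × String)) :
    ∀ (d i : Nat), i ≤ items.length → items.length - i ≤ d →
    pvOuter items (pvPrefix 0 items) mi mc (items.length : Int) (i : Int) =
      pvNested mi mc (items.drop i) := by
  intro d
  induction d with
  | zero =>
    intro i hi hd
    have hie : i = items.length := by omega
    subst hie
    rw [pvOuter, dif_neg (by omega : ¬ ((items.length : Int) : Int) < (items.length : Int))]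
    simp [pvNested]
  | succ d ih =>
    intro i hi hd
    by_cases hilt : i < items.length
    · have hdrop := List.drop_eq_getElem_cons hilt
      set x := items[i] with hxdef
      set xs := items.drop (i + 1) with hxsdef
      have hxslen : xs.length = items.length - (i + 1) := by
        rw [hxsdef, List.length_drop]
      obtain ⟨t, ht, heq, hall, hend⟩ := pvAltInner_spec mi mc xs [x] (PySem.Str.len x.2)
      -- pvAt over the prefix array is the running char sum
      have hat : ∀ k : Nat, k ≤ items.length →
          pvAt (pvPrefix 0 items) (k : Int) = pvS items k := by
        intro k hk
        simpa using pvAt_pvPrefix items 0 k hk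
      have hmono : ∀ a b : Int, 0 ≤ a → a ≤ b → b ≤ (items.length : Int) →
          pvAt (pvPrefix 0 items) a ≤ pvAt (pvPrefix 0 items) b := by
        intro a b ha hab hb
        lift a to Nat using ha
        lift b to Nat using (by omega : (0:Int) ≤ b)
        rw [hat a (by exact_mod_cast le_trans hab hb), hat b (by exact_mod_cast hb)]
        exact pvS_mono items (by exact_mod_cast hab)
      have hstep : ∀ k : Nat, k + 1 ≤ xs.length →
          pvS items (i + (k + 2)) = pvS items i + (PySem.Str.len x.2 + pvS xs (k + 1)) := by
        intro k hk
        rw [pvS_add items i (k + 2), hdrop, pvS_cons_succ]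
        simp [pvLen2]
      -- greedy conditions in prefix-array terms
      have hallP : ∀ k : Nat, k < t →
          (1 + (k : Int) < mi ∧
            pvAt (pvPrefix 0 items) ((i : Int) + 2 + k) - pvAt (pvPrefix 0 items) (i : Int) ≤ mc) := by
        intro k hk
        have h := hall k hk
        have hkx : k + 1 ≤ xs.length := by omega
        have hidx : ((i : Int) + 2 + k) = ((i + (k + 2) : Nat) : Int) := by push_cast; ring
        constructor
        · have := h.1; simpa using this
        · rw [hidx, hat (i + (k + 2)) (by omega), hstep k hkx, hat i (by omega)]
          have h2 := h.2
          simp only [PySem.Str.len_eq] at h2 ⊢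
          omega
      have hendP : t = xs.length ∨ (¬ (1 + (t : Int) < mi)) ∨
          ¬ (pvAt (pvPrefix 0 items) ((i : Int) + 2 + t) - pvAt (pvPrefix 0 items) (i : Int) ≤ mc) := by
        rcases hend with he | hne
        · left; exact he
        · by_cases htl : t = xs.length
          · left; exact htl
          · have htx : t + 1 ≤ xs.length := by omega
            rcases not_and_or.1 hne with h | h
            · right; left
              intro hcon; apply h; simpa using hcon
            · right; right
              have hidx : ((i : Int) + 2 + t) = ((i + (t + 2) : Nat) : Int) := by push_cast; ring
              rw [hidx, hat (i + (t + 2)) (by omega), hstep t htx, hat i (by omega)]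
              simp only [PySem.Str.len_eq] at h ⊢
              omega
      -- the computed end index is exactly the greedy end
      have hEe : pvEnd (pvPrefix 0 items) mi mc (items.length : Int) (i : Int)
          = (i : Int) + 1 + t := by
        unfold pvEnd
        obtain ⟨hr1, hr2, hr3, hr4⟩ :=
          pvBSearch_inv (pvPrefix 0 items) (pvAt (pvPrefix 0 items) (i : Int)) mc
            (((items.length : Int) + 1 - ((i : Int) + 1)).toNat) ((i : Int) + 1)
            ((items.length : Int) + 1) (le_refl _) (by omega)
        set r := pvBSearch (pvPrefix 0 items) (pvAt (pvPrefix 0 items) (i : Int)) mc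
            ((i : Int) + 1) ((items.length : Int) + 1) with hrdef
        -- lower bound
        have hLB : (i : Int) + 1 + t ≤ max ((i : Int) + 1) (min ((i : Int) + mi) (r - 1)) := by
          rcases Nat.eq_zero_or_pos t with h0 | hpos
          · subst h0
            have := le_max_left ((i : Int) + 1) (min ((i : Int) + mi) (r - 1))
            omega
          · obtain ⟨hf1, hf2⟩ := hallP (t - 1) (by omega)
            have hc1 : ((i : Int) + 2 + ((t - 1 : Nat) : Int)) = (i : Int) + 1 + t := by omega
            rw [hc1] at hf2
            have hrb : (i : Int) + 1 + t ≤ r - 1 := by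
              by_contra hcon
              push Not at hcon
              rcases hr4 with he | hnp
              · omega
              · apply hnp
                have := hmono r ((i : Int) + 1 + t) (by omega) (by omega) (by omega)
                omega
            have h1 := le_max_right ((i : Int) + 1) (min ((i : Int) + mi) (r - 1))
            rcases min_choice ((i : Int) + mi) (r - 1) with hm | hm <;> omega
        -- upper bound
        have hUB : max ((i : Int) + 1) (min ((i : Int) + mi) (r - 1)) ≤ (i : Int) + 1 + t := by
          rcases hendP with he | hmi | hnp
          · rcases max_choice ((i : Int) + 1) (min ((i : Int) + mi) (r - 1)) with hM | hM <;>
              rcases min_choice ((i : Int) + mi) (r - 1) with hm | hm <;> omega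
          · rcases max_choice ((i : Int) + 1) (min ((i : Int) + mi) (r - 1)) with hM | hM <;>
              rcases min_choice ((i : Int) + mi) (r - 1) with hm | hm <;> omega
          · have hrb : r ≤ (i : Int) + 2 + t := by
              by_contra hcon
              push Not at hcon
              rcases hr3 with he | hpr
              · omega
              · apply hnp
                have := hmono ((i : Int) + 2 + t) (r - 1) (by omega) (by omega) (by omega)
                omega
            rcases max_choice ((i : Int) + 1) (min ((i : Int) + mi) (r - 1)) with hM | hM <;>
              rcases min_choice ((i : Int) + mi) (r - 1) with hm | hm <;> omega
        omega
      -- one unfolding of the outer loop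
      rw [pvOuter, dif_pos (by omega : (i : Int) < (items.length : Int)), hEe]
      have hslice : PySem.List.slice items (some (i : Int)) (some ((i : Int) + 1 + t))
          = x :: xs.take t := by
        have hc : ((i : Int) + 1 + t) = ((i : Int) + ((t + 1 : Nat) : Int)) := by push_cast; ring
        rw [hc, PySem.List.slice_natCast_add, hdrop]
        simp
      have hcast : ((i : Int) + 1 + t) = ((i + 1 + t : Nat) : Int) := by push_cast; ring
      rw [hslice, hcast, ih (i + 1 + t) (by omega) (by omega)]
      -- the nested recursion takes the same step
      rw [hdrop]
      show _ = pvNested mi mc (x :: xs)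
      rw [pvNested]
      rw [heq]
      have hdd : xs.drop t = items.drop (i + 1 + t) := by
        rw [hxsdef, List.drop_drop]
      simp [hdd]
    · have hie2 : i = items.length := by omega
      subst hie2
      rw [pvOuter, dif_neg (by omega : ¬ ((items.length : Int) : Int) < (items.length : Int))]
      simp [pvNested]

-- ===== VERDICT (by name: the statement is the Claim_ definition above) =====
theorem chunk_indices_by_budget_py_spec : Claim_equal_chunk_indices_by_budget_py := by
  intro items mi mc _
  unfold Spec_chunk_indices_by_budget_py
  rw [pvA_eq_nested]
  unfold chunk_indices_by_budget_py_alt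
  have := pvOuter_eq_nested mi mc items items.length 0 (by omega) (by omega)
  simpa using this.symm
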